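-- pv_equiv track=rewrite | github.com/lamismanota/la-misma-nota-web | build.py | quote_object_keys
-- ===== SOURCE A (Python) =====
-- def quote_object_keys(source: str) -> str:
--     result = []
--     in_string = False
--     escape = False
--     quote = ""
--     index = 0
--
--     while index < len(source):
--         char = source[index]
--
--         if in_string:
--             result.append(char)
--             if escape:
--                 escape = False
--             elif char == "\\":
--                 escape = True
--             elif char == quote:
--                 in_string = False
--             index += 1
--             continue
--
--         if char in ('"', "'"):
--             in_string = True
--             quote = char
--             result.append(char)
--             index += 1
--             continue
--
--         if char.isalpha() or char in ("_", "$"):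
--             previous = source[index - 1] if index > 0 else ""
--             if previous in "{,\n ":
--                 start = index
--                 while index < len(source) and (source[index].isalnum() or source[index] in ("_", "$")):
--                     index += 1
--                 key = source[start:index]
--                 lookahead = index
--                 while lookahead < len(source) and source[lookahead].isspace():
--                     lookahead += 1
--                 if lookahead < len(source) and source[lookahead] == ":":
--                     result.append(f'"{key}"')
--                     continue
--                 result.append(key)
--                 continue
--
--         result.append(char)
--         index += 1
--
--     return "".join(result)
-- ===== SOURCE B (Python) =====
-- def _scan_string(s, i):
--     """Index just past the string literal opening at s[i]; backslash escapes
--     honoured; an unterminated literal runs to end of string."""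
--     q = s[i]
--     j = i + 1
--     n = len(s)
--     while j < n:
--         if s[j] == "\\":
--             j += 2
--         elif s[j] == q:
--             return j + 1
--         else:
--             j += 1
--     return n
--
--
-- def _segments(source):
--     """Stage 1: split the source into maximal alternating segments
--     (is_string, start, end) — whole string literals and quote-free code runs."""
--     segs = []
--     i = 0
--     n = len(source)
--     while i < n:
--         if source[i] in "\"'":
--             j = _scan_string(source, i)
--             segs.append((True, i, j))
--         else:
--             j = i
--             while j < n and source[j] not in "\"'":
--                 j += 1
--             segs.append((False, i, j))
--         i = j
--     return segs
--
--
-- def _quote_keys(text, prev):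
--     """Stage 2: quote unquoted keys inside a quote-free code segment.
--     prev is the character preceding the segment ('' at the very start)."""
--     out = []
--     i = 0
--     n = len(text)
--     while i < n:
--         c = text[i]
--         before = prev if i == 0 else text[i - 1]
--         if (c.isalpha() or c in "_$") and before in "{,\n ":
--             j = i + 1
--             while j < n and (text[j].isalnum() or text[j] in "_$"):
--                 j += 1
--             k = j
--             while k < n and text[k].isspace():
--                 k += 1
--             key = text[i:j]
--             out.append('"%s"' % key if k < n and text[k] == ":" else key)
--             i = j
--         else:
--             out.append(c)
--             i += 1
--     return "".join(out)
--
--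
-- def quote_object_keys(source: str) -> str:
--     parts = []
--     for is_string, start, end in _segments(source):
--         seg = source[start:end]
--         parts.append(seg if is_string else
--                      _quote_keys(seg, source[start - 1] if start else ""))
--     return "".join(parts)
-- ===== Notes on version B (the rewrite author's own statement) =====
-- stated objective: alternative
-- what changed: Replaced the single-pass in_string/escape character state machine with two staged passes: a tokenizer first splits the source into whole string-literal and quote-free code segments, then a separate key-quoting transformation is applied to the code segments only (threading the character preceding each segment), and the pieces are joined.
import Mathlib
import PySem

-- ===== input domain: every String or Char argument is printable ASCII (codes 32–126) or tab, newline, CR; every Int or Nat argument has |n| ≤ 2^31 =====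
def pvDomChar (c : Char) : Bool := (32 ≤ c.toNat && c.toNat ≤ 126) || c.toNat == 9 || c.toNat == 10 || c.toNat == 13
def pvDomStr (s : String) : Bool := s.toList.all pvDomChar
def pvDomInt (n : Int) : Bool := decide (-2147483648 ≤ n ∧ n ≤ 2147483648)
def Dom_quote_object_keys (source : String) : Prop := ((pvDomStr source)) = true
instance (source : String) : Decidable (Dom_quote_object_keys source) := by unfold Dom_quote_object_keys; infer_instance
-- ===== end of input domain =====

-- B restructures A's single-pass in_string/escape character state machine into two staged
-- passes: a tokenizer splits the source into whole string-literal and quote-free code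
-- segments, then a key-quoting transformation is mapped over the code segments only
-- (alternative decomposition, same asymptotic cost).  All loops are ported with a
-- structural `fuel` parameter as a pure totality guard (the index strictly increases,
-- so the fuels the ports pass never run out).

-- ===== PORT A =====
-- A's inner `while index < len(source) and (source[index].isalnum() or source[index] in ("_","$"))`
def qokKeyEnd (cs : List Char) (fuel j : Nat) : Nat :=
  match fuel with
  | 0 => j
  | fuel+1 =>
    if h : j < cs.length then
      if PySem.Chars.isalnum cs[j] || cs[j] == '_' || cs[j] == '$' then qokKeyEnd cs fuel (j+1) else j
    else j

-- A's inner `while lookahead < len(source) and source[lookahead].isspace()`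
def qokWsEnd (cs : List Char) (fuel k : Nat) : Nat :=
  match fuel with
  | 0 => k
  | fuel+1 =>
    if h : k < cs.length then
      if PySem.Chars.isspace cs[k] then qokWsEnd cs fuel (k+1) else k
    else k

-- Outer while-loop of A.  `result` is the list of appended characters ("".join at the end);
-- Python's initial quote = "" is never compared while in_string is False, ported as a Char parameter.
def qokLoopA (cs : List Char) (fuel : Nat) (result : List Char) (inString escape : Bool)
    (quote : Char) (index : Nat) : List Char :=
  match fuel with
  | 0 => result
  | fuel+1 =>
    if h : index < cs.length then
      let char := cs[index]
      if inString then
        if escape then qokLoopA cs fuel (result ++ [char]) true false quote (index+1)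
        else if char == '\\' then qokLoopA cs fuel (result ++ [char]) true true quote (index+1)
        else if char == quote then qokLoopA cs fuel (result ++ [char]) false escape quote (index+1)
        else qokLoopA cs fuel (result ++ [char]) true escape quote (index+1)
      else if char == '"' || char == '\'' then
        qokLoopA cs fuel (result ++ [char]) true escape char (index+1)
      else if PySem.Chars.isalpha char || char == '_' || char == '$' then
        -- previous = source[index-1] if index > 0 else ""; note "" in "{,\n " is True in Python
        if (if index = 0 then true
            else (cs.getD (index-1) ' ' == '{' || cs.getD (index-1) ' ' == ',' ||
                  cs.getD (index-1) ' ' == '\n' || cs.getD (index-1) ' ' == ' ')) then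
          let start := index
          let index' := qokKeyEnd cs cs.length index
          let key := PySem.List.slice cs (some (start : Int)) (some (index' : Int))
          let lookahead := qokWsEnd cs cs.length index'
          if hl : lookahead < cs.length then
            if cs[lookahead] == ':' then
              qokLoopA cs fuel (result ++ ('"' :: key ++ ['"'])) inString escape quote index'
            else qokLoopA cs fuel (result ++ key) inString escape quote index'
          else qokLoopA cs fuel (result ++ key) inString escape quote index'
        else qokLoopA cs fuel (result ++ [char]) inString escape quote (index+1)
      else qokLoopA cs fuel (result ++ [char]) inString escape quote (index+1)
    else result

def quote_object_keys (source : String) : String :=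
  String.ofList (qokLoopA source.toList (source.toList.length + 1) [] false false ' ' 0)

-- ===== PORT B =====
-- Source B `_scan_string`'s while loop (fuel exhaustion returns len(s), the unterminated-literal value)
def qokScanGoB (cs : List Char) (q : Char) (fuel j : Nat) : Nat :=
  match fuel with
  | 0 => cs.length
  | fuel+1 =>
    if h : j < cs.length then
      if cs[j] == '\\' then qokScanGoB cs q fuel (j+2)
      else if cs[j] == q then j + 1
      else qokScanGoB cs q fuel (j+1)
    else cs.length

-- Source B `_scan_string(s, i)`
def qokScanStringB (cs : List Char) (i : Nat) : Nat :=
  qokScanGoB cs (cs.getD i ' ') cs.length (i+1)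

-- `_segments` inner `while j < n and source[j] not in '"\''`: end of a quote-free code run
def qokCodeEnd (cs : List Char) (fuel j : Nat) : Nat :=
  match fuel with
  | 0 => j
  | fuel+1 =>
    if h : j < cs.length then
      if cs[j] == '"' || cs[j] == '\'' then j else qokCodeEnd cs fuel (j+1)
    else j

-- `_segments` outer while: the list of (is_string, start, end) triples
def qokSegs (cs : List Char) (fuel i : Nat) : List (Bool × Nat × Nat) :=
  match fuel with
  | 0 => []
  | fuel+1 =>
    if h : i < cs.length then
      if cs[i] == '"' || cs[i] == '\'' then
        (true, i, qokScanStringB cs i) :: qokSegs cs fuel (qokScanStringB cs i)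
      else
        (false, i, qokCodeEnd cs cs.length i) :: qokSegs cs fuel (qokCodeEnd cs cs.length i)
    else []

-- `_quote_keys`'s inner key scan (`while j < n and (text[j].isalnum() or text[j] in "_$")`)
def qokKeyEndT (t : List Char) (fuel j : Nat) : Nat :=
  match fuel with
  | 0 => j
  | fuel+1 =>
    if h : j < t.length then
      if PySem.Chars.isalnum t[j] || t[j] == '_' || t[j] == '$' then qokKeyEndT t fuel (j+1) else j
    else j

-- `_quote_keys`'s whitespace scan (`while k < n and text[k].isspace()`)
def qokWsEndT (t : List Char) (fuel k : Nat) : Nat :=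
  match fuel with
  | 0 => k
  | fuel+1 =>
    if h : k < t.length then
      if PySem.Chars.isspace t[k] then qokWsEndT t fuel (k+1) else k
    else k

-- `_quote_keys` main while; `out` is the list of appended pieces, joined by the caller.
-- Python's `prev` is '' or a one-character string; ported as Option Char (none = '', and
-- `'' in "{,\n "` is True in Python, hence the `none => true` arm of `before`).
def qokQKLoop (t : List Char) (prev : Option Char) (fuel : Nat) (out : List (List Char))
    (i : Nat) : List (List Char) :=
  match fuel with
  | 0 => out
  | fuel+1 =>
    if h : i < t.length then
      let c := t[i]
      let beforeOk :=
        match (if i = 0 then prev else some (t.getD (i-1) ' ')) with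
        | none => true
        | some b => b == '{' || b == ',' || b == '\n' || b == ' '
      if (PySem.Chars.isalpha c || c == '_' || c == '$') && beforeOk then
        let j := qokKeyEndT t t.length (i+1)
        let k := qokWsEndT t t.length j
        let key := PySem.List.slice t (some (i : Int)) (some (j : Int))
        if hk : k < t.length then
          if t[k] == ':' then qokQKLoop t prev fuel (out ++ ['"' :: key ++ ['"']]) j
          else qokQKLoop t prev fuel (out ++ [key]) j
        else qokQKLoop t prev fuel (out ++ [key]) j
      else qokQKLoop t prev fuel (out ++ [[c]]) (i+1)
    else out

-- `_quote_keys(text, prev)` = "".join(out)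
def qokQuoteKeys (t : List Char) (prev : Option Char) : List Char :=
  (qokQKLoop t prev (t.length + 1) [] 0).flatten

-- top level: for each segment take the slice verbatim (string) or quote its keys (code)
def quote_object_keys_alt (source : String) : String :=
  String.ofList
    (((qokSegs source.toList (source.toList.length + 1) 0).map (fun seg =>
      let t := PySem.List.slice source.toList (some (seg.2.1 : Int)) (some (seg.2.2 : Int))
      if seg.1 then t
      else qokQuoteKeys t
        (if seg.2.1 = 0 then none
         else some (source.toList.getD (seg.2.1 - 1) ' ')))).flatten)

-- ===== PRECONDITION & SPEC =====
def Spec_quote_object_keys (source : String) (out : String) : Prop := out = quote_object_keys_alt source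
instance (source : String) (out : String) : Decidable (Spec_quote_object_keys source out) := by unfold Spec_quote_object_keys; infer_instance

-- ===== CLAIM (what is proved, stated in full; the proofs are below) =====
def Claim_equal_quote_object_keys : Prop := ∀ (source : String), Dom_quote_object_keys source → Spec_quote_object_keys source (quote_object_keys source)

-- ===== LEMMAS AND PROOFS =====

theorem qokKeyEnd_le (cs : List Char) : ∀ fuel j, j ≤ qokKeyEnd cs fuel j := by
  intro fuel
  induction fuel with
  | zero => intro j; simp [qokKeyEnd]
  | succ f ih =>
    intro j
    simp only [qokKeyEnd]
    split_ifs
    · have := ih (j+1); omega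
    · omega
    · omega

theorem qokKeyEnd_le_length (cs : List Char) :
    ∀ fuel j, j ≤ cs.length → qokKeyEnd cs fuel j ≤ cs.length := by
  intro fuel
  induction fuel with
  | zero => intro j hj; simpa [qokKeyEnd] using hj
  | succ f ih =>
    intro j hj
    simp only [qokKeyEnd]
    split_ifs with h hc
    · exact ih (j+1) (by omega)
    · omega
    · omega

theorem qokKeyEnd_start_lt (cs : List Char) (fuel j : Nat) (hf : 0 < fuel) (h : j < cs.length)
    (hc : (PySem.Chars.isalnum cs[j] || cs[j] == '_' || cs[j] == '$') = true) :
    j + 1 ≤ qokKeyEnd cs fuel j := by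
  cases fuel with
  | zero => omega
  | succ f =>
    simp only [qokKeyEnd, dif_pos h, hc, if_pos]
    exact qokKeyEnd_le cs f (j+1)

theorem qokWsEnd_le (cs : List Char) : ∀ fuel j, j ≤ qokWsEnd cs fuel j := by
  intro fuel
  induction fuel with
  | zero => intro j; simp [qokWsEnd]
  | succ f ih =>
    intro j
    simp only [qokWsEnd]
    split_ifs
    · have := ih (j+1); omega
    · omega
    · omega

theorem qokWsEnd_le_length (cs : List Char) :
    ∀ fuel j, j ≤ cs.length → qokWsEnd cs fuel j ≤ cs.length := by
  intro fuel
  induction fuel with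
  | zero => intro j hj; simpa [qokWsEnd] using hj
  | succ f ih =>
    intro j hj
    simp only [qokWsEnd]
    split_ifs with h hc
    · exact ih (j+1) (by omega)
    · omega
    · omega

theorem qokScanGoB_le (cs : List Char) (q : Char) : ∀ fuel j, qokScanGoB cs q fuel j ≤ cs.length := by
  intro fuel
  induction fuel with
  | zero => intro j; simp [qokScanGoB]
  | succ f ih =>
    intro j
    simp only [qokScanGoB]
    split_ifs <;> first | exact ih _ | omega

theorem qokScanGoB_min_le (cs : List Char) (q : Char) :
    ∀ fuel j, min j cs.length ≤ qokScanGoB cs q fuel j := by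
  intro fuel
  induction fuel with
  | zero => intro j; simp [qokScanGoB]
  | succ f ih =>
    intro j
    simp only [qokScanGoB]
    split_ifs with h h1 h2
    · have := ih (j+2); omega
    · omega
    · have := ih (j+1); omega
    · omega

-- drop/take bookkeeping for peeling one character off a chunk
theorem chunk_cons (cs : List Char) (j s : Nat) (h : j < cs.length) (hs : j + 1 ≤ s) :
    (cs.drop j).take (s - j) = cs[j] :: (cs.drop (j+1)).take (s - (j+1)) := by
  rw [List.drop_eq_getElem_cons h]
  have hsj : s - j = (s - (j+1)) + 1 := by omega
  rw [hsj, List.take_succ_cons]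

-- evaluation helpers for A's loop (used only by the proofs below)
theorem qokLoopA_done (cs : List Char) (q : Char) (j : Nat) (hj : ¬ j < cs.length) :
    ∀ f r ins esc, qokLoopA cs f r ins esc q j = r := by
  intro f r ins esc
  cases f with
  | zero => rfl
  | succ f => rw [qokLoopA, dif_neg hj]

theorem qokLoopA_step_esc (cs : List Char) (q : Char) (j f : Nat) (r : List Char)
    (h : j < cs.length) :
    qokLoopA cs (f+1) r true true q j = qokLoopA cs f (r ++ [cs[j]]) true false q (j+1) := by
  rw [qokLoopA, dif_pos h]; simp

theorem qokLoopA_step_bs (cs : List Char) (q : Char) (j f : Nat) (r : List Char)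
    (h : j < cs.length) (hb : (cs[j] == '\\') = true) :
    qokLoopA cs (f+1) r true false q j = qokLoopA cs f (r ++ [cs[j]]) true true q (j+1) := by
  rw [qokLoopA, dif_pos h]; simp [hb]

theorem qokLoopA_step_close (cs : List Char) (q : Char) (j f : Nat) (r : List Char)
    (h : j < cs.length) (hb : (cs[j] == '\\') = false) (hq : (cs[j] == q) = true) :
    qokLoopA cs (f+1) r true false q j = qokLoopA cs f (r ++ [cs[j]]) false false q (j+1) := by
  rw [qokLoopA, dif_pos h]; simp [hb, hq]

theorem qokLoopA_step_other (cs : List Char) (q : Char) (j f : Nat) (r : List Char)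
    (h : j < cs.length) (hb : (cs[j] == '\\') = false) (hq : (cs[j] == q) = false) :
    qokLoopA cs (f+1) r true false q j = qokLoopA cs f (r ++ [cs[j]]) true false q (j+1) := by
  rw [qokLoopA, dif_pos h]; simp [hb, hq]

-- A's in-string run from index j equals appending the chunk up to B's scan end and resuming,
-- with exactly one unit of loop fuel spent per consumed character
theorem qokLoopA_string (cs : List Char) (q : Char) :
    ∀ m j result fa fg, cs.length - j ≤ m → cs.length - j < fa → cs.length - j ≤ fg →
      qokLoopA cs fa result true false q j =
      qokLoopA cs (fa - (qokScanGoB cs q fg j - j))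
        (result ++ (cs.drop j).take (qokScanGoB cs q fg j - j)) false false q
        (qokScanGoB cs q fg j) := by
  intro m
  induction m with
  | zero =>
    intro j result fa fg hm hfa hfg
    have hj : ¬ j < cs.length := by omega
    have hsg : qokScanGoB cs q fg j = cs.length := by
      cases fg with
      | zero => rfl
      | succ f => rw [qokScanGoB, dif_neg hj]
    rw [hsg]
    have hch : (cs.drop j).take (cs.length - j) = [] := by
      simp [List.drop_eq_nil_of_le (by omega : cs.length ≤ j)]
    rw [hch, List.append_nil]
    rw [qokLoopA_done cs q j hj, qokLoopA_done cs q cs.length (by omega)]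
  | succ m ih =>
    intro j result fa fg hm hfa hfg
    by_cases h : j < cs.length
    · obtain ⟨fg', rfl⟩ : ∃ f, fg = f + 1 := ⟨fg - 1, by omega⟩
      obtain ⟨fa', rfl⟩ : ∃ f, fa = f + 1 := ⟨fa - 1, by omega⟩
      rw [qokScanGoB, dif_pos h]
      by_cases hb : (cs[j] == '\\') = true
      · simp only [hb, if_true]
        rw [qokLoopA_step_bs cs q j fa' result h hb]
        by_cases h2 : j + 1 < cs.length
        · obtain ⟨fa'', rfl⟩ : ∃ f, fa' = f + 1 := ⟨fa' - 1, by omega⟩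
          rw [qokLoopA_step_esc cs q (j+1) fa'' _ h2]
          have hs2 : j + 2 ≤ qokScanGoB cs q fg' (j+2) := by
            have := qokScanGoB_min_le cs q fg' (j+2); omega
          have hs2le := qokScanGoB_le cs q fg' (j+2)
          rw [ih (j+2) (result ++ [cs[j]] ++ [cs[j+1]]) fa'' fg' (by omega) (by omega) (by omega)]
          rw [chunk_cons cs j _ h (by omega), chunk_cons cs (j+1) _ h2 (by omega)]
          have hfe : fa'' - (qokScanGoB cs q fg' (j+2) - (j+2)) =
              fa'' + 1 + 1 - (qokScanGoB cs q fg' (j+2) - j) := by omega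
          rw [hfe]
          simp
        · rw [qokLoopA_done cs q (j+1) h2]
          have hsg : qokScanGoB cs q fg' (j+2) = cs.length := by
            cases fg' with
            | zero => rfl
            | succ f => rw [qokScanGoB, dif_neg (by omega)]
          rw [hsg]
          rw [chunk_cons cs j _ h (by omega)]
          have hch : (cs.drop (j+1)).take (cs.length - (j+1)) = [] := by
            simp [List.drop_eq_nil_of_le (by omega : cs.length ≤ j + 1)]
          rw [hch]
          rw [qokLoopA_done cs q cs.length (by omega)]
      · rw [Bool.not_eq_true] at hb
        simp only [hb, Bool.false_eq_true, if_false]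
        by_cases hq2 : (cs[j] == q) = true
        · simp only [hq2, if_true]
          rw [qokLoopA_step_close cs q j fa' result h hb hq2]
          have hfe : fa' + 1 - (j + 1 - j) = fa' := by omega
          rw [hfe, chunk_cons cs j _ h (by omega)]
          simp
        · rw [Bool.not_eq_true] at hq2
          simp only [hq2, Bool.false_eq_true, if_false]
          rw [qokLoopA_step_other cs q j fa' result h hb hq2]
          have hs1 : j + 1 ≤ qokScanGoB cs q fg' (j+1) := by
            have := qokScanGoB_min_le cs q fg' (j+1); omega
          have hs1le := qokScanGoB_le cs q fg' (j+1)
          rw [ih (j+1) (result ++ [cs[j]]) fa' fg' (by omega) (by omega) (by omega)]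
          rw [chunk_cons cs j _ h (by omega)]
          have hfe : fa' - (qokScanGoB cs q fg' (j+1) - (j+1)) =
              fa' + 1 - (qokScanGoB cs q fg' (j+1) - j) := by omega
          rw [hfe]
          simp
    · have hsg : qokScanGoB cs q fg j = cs.length := by
        cases fg with
        | zero => rfl
        | succ f => rw [qokScanGoB, dif_neg h]
      rw [hsg]
      have hch : (cs.drop j).take (cs.length - j) = [] := by
        simp [List.drop_eq_nil_of_le (by omega : cs.length ≤ j)]
      rw [hch, List.append_nil]
      rw [qokLoopA_done cs q j h, qokLoopA_done cs q cs.length (by omega)]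

-- fuel invariance for A's loop (every branch advances the index)
theorem qokLoopA_inv (cs : List Char) :
    ∀ m f1 f2 r ins esc q i, cs.length - i ≤ m → m < f1 → m < f2 →
      qokLoopA cs f1 r ins esc q i = qokLoopA cs f2 r ins esc q i := by
  intro m
  induction m with
  | zero =>
    intro f1 f2 r ins esc q i hm h1 h2
    obtain ⟨g1, rfl⟩ : ∃ g, f1 = g + 1 := ⟨f1 - 1, by omega⟩
    obtain ⟨g2, rfl⟩ : ∃ g, f2 = g + 1 := ⟨f2 - 1, by omega⟩
    rw [qokLoopA, qokLoopA, dif_neg (by omega), dif_neg (by omega)]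
  | succ m ih =>
    intro f1 f2 r ins esc q i hm h1 h2
    obtain ⟨g1, rfl⟩ : ∃ g, f1 = g + 1 := ⟨f1 - 1, by omega⟩
    obtain ⟨g2, rfl⟩ : ∃ g, f2 = g + 1 := ⟨f2 - 1, by omega⟩
    by_cases h : i < cs.length
    · rw [qokLoopA, qokLoopA, dif_pos h, dif_pos h]
      simp only
      split_ifs with h1' h2' h3' h4' h5' h6' h7' h8' h9' <;>
        first
          | exact ih g1 g2 _ _ _ _ _ (by omega) (by omega) (by omega)
          | · have hk : i + 1 ≤ qokKeyEnd cs cs.length i := by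
                apply qokKeyEnd_start_lt cs cs.length i (by omega) h
                have ha : (PySem.Chars.isalpha (cs[i]) || cs[i] == '_' || cs[i] == '$') = true := by
                  assumption
                simp only [PySem.Chars.isalnum]
                revert ha
                simp
                tauto
              have hkl : qokKeyEnd cs cs.length i ≤ cs.length :=
                qokKeyEnd_le_length cs cs.length i (by omega)
              exact ih g1 g2 _ _ _ _ _ (by omega) (by omega) (by omega)
    · rw [qokLoopA, qokLoopA, dif_neg h, dif_neg h]

theorem qokKeyEnd_inv (cs : List Char) :
    ∀ m j f1 f2, cs.length - j ≤ m → m ≤ f1 → m ≤ f2 →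
      qokKeyEnd cs f1 j = qokKeyEnd cs f2 j := by
  intro m
  induction m with
  | zero =>
    intro j f1 f2 hm h1 h2
    have hj : ¬ j < cs.length := by omega
    cases f1 <;> cases f2 <;> simp [qokKeyEnd, hj]
  | succ m ih =>
    intro j f1 f2 hm h1 h2
    obtain ⟨g1, rfl⟩ : ∃ g, f1 = g + 1 := ⟨f1 - 1, by omega⟩
    obtain ⟨g2, rfl⟩ : ∃ g, f2 = g + 1 := ⟨f2 - 1, by omega⟩
    by_cases h : j < cs.length
    · rw [qokKeyEnd, qokKeyEnd, dif_pos h, dif_pos h]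
      split_ifs with hc
      · exact ih (j+1) g1 g2 (by omega) (by omega) (by omega)
      · rfl
    · rw [qokKeyEnd, qokKeyEnd, dif_neg h, dif_neg h]

theorem qokWsEnd_inv (cs : List Char) :
    ∀ m j f1 f2, cs.length - j ≤ m → m ≤ f1 → m ≤ f2 →
      qokWsEnd cs f1 j = qokWsEnd cs f2 j := by
  intro m
  induction m with
  | zero =>
    intro j f1 f2 hm h1 h2
    have hj : ¬ j < cs.length := by omega
    cases f1 <;> cases f2 <;> simp [qokWsEnd, hj]
  | succ m ih =>
    intro j f1 f2 hm h1 h2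
    obtain ⟨g1, rfl⟩ : ∃ g, f1 = g + 1 := ⟨f1 - 1, by omega⟩
    obtain ⟨g2, rfl⟩ : ∃ g, f2 = g + 1 := ⟨f2 - 1, by omega⟩
    by_cases h : j < cs.length
    · rw [qokWsEnd, qokWsEnd, dif_pos h, dif_pos h]
      split_ifs with hc
      · exact ih (j+1) g1 g2 (by omega) (by omega) (by omega)
      · rfl
    · rw [qokWsEnd, qokWsEnd, dif_neg h, dif_neg h]

-- the T-scanners are the same recursions as A's scanners
theorem qokKeyEndT_eq (t : List Char) : ∀ fuel j, qokKeyEndT t fuel j = qokKeyEnd t fuel j := by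
  intro fuel
  induction fuel with
  | zero => intro j; rfl
  | succ f ih =>
    intro j
    simp only [qokKeyEndT, qokKeyEnd]
    split_ifs <;> simp [ih]

theorem qokWsEndT_eq (t : List Char) : ∀ fuel j, qokWsEndT t fuel j = qokWsEnd t fuel j := by
  intro fuel
  induction fuel with
  | zero => intro j; rfl
  | succ f ih =>
    intro j
    simp only [qokWsEndT, qokWsEnd]
    split_ifs <;> simp [ih]

-- trivial stopping facts for the scanners
theorem qokKeyEnd_stop (cs : List Char) (f j : Nat) (h : ¬ j < cs.length) :
    qokKeyEnd cs f j = j := by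
  cases f <;> simp [qokKeyEnd, h]

theorem qokKeyEnd_stop_char (cs : List Char) (f j : Nat) (h : j < cs.length)
    (hc : (PySem.Chars.isalnum cs[j] || cs[j] == '_' || cs[j] == '$') = false) :
    qokKeyEnd cs f j = j := by
  cases f with
  | zero => rfl
  | succ f => rw [qokKeyEnd, dif_pos h, if_neg (by simp [hc])]

theorem qokWsEnd_stop (cs : List Char) (f j : Nat) (h : ¬ j < cs.length) :
    qokWsEnd cs f j = j := by
  cases f <;> simp [qokWsEnd, h]

theorem qokKeyEnd_step (cs : List Char) (f j : Nat) (hf : 0 < f) (h : j < cs.length)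
    (hc : (PySem.Chars.isalnum cs[j] || cs[j] == '_' || cs[j] == '$') = true) :
    qokKeyEnd cs f j = qokKeyEnd cs (f-1) (j+1) := by
  obtain ⟨g, rfl⟩ : ∃ g, f = g + 1 := ⟨f - 1, by omega⟩
  rw [qokKeyEnd, dif_pos h, if_pos (by simp [hc])]
  simp

theorem qokWsEnd_step (cs : List Char) (f j : Nat) (hf : 0 < f) (h : j < cs.length)
    (hc : PySem.Chars.isspace cs[j] = true) :
    qokWsEnd cs f j = qokWsEnd cs (f-1) (j+1) := by
  obtain ⟨g, rfl⟩ : ∃ g, f = g + 1 := ⟨f - 1, by omega⟩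
  rw [qokWsEnd, dif_pos h, if_pos (by simp [hc])]
  simp

theorem qokWsEnd_stop_char (cs : List Char) (f j : Nat) (h : j < cs.length)
    (hc : PySem.Chars.isspace cs[j] = false) :
    qokWsEnd cs f j = j := by
  cases f with
  | zero => rfl
  | succ f => rw [qokWsEnd, dif_pos h, if_neg (by simp [hc])]

-- a quote character at the boundary stops both scanners
theorem qok_quote_cases (cs : List Char) (e : Nat) (h : e < cs.length)
    (hb : (cs.getD e ' ' == '"' || cs.getD e ' ' == '\'') = true) :
    cs[e] = '"' ∨ cs[e] = '\'' := by
  rw [List.getD_eq_getElem cs ' ' h] at hb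
  simp at hb
  rcases hb with hb | hb
  · exact Or.inl hb
  · exact Or.inr hb

-- shifting a key scan from the full source into the code segment [s, e)
theorem qokKeyEnd_shift (cs : List Char) (s e : Nat) (he : e ≤ cs.length)
    (hb : e < cs.length → (cs.getD e ' ' == '"' || cs.getD e ' ' == '\'') = true) :
    ∀ m jt, (e - s) - jt ≤ m → s + jt ≤ e →
      qokKeyEnd cs cs.length (s + jt)
        = s + qokKeyEnd ((cs.drop s).take (e - s)) (e - s) jt := by
  intro m
  induction m with
  | zero =>
    intro jt hm hle
    have hse : s ≤ e := by omega
    have hjt : jt = e - s := by omega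
    have hej : s + jt = e := by omega
    have hlen : ((cs.drop s).take (e - s)).length = e - s := by simp; omega
    rw [hej, hjt]
    rw [qokKeyEnd_stop ((cs.drop s).take (e - s)) (e - s) (e - s) (by omega)]
    by_cases hlt : e < cs.length
    · rw [qokKeyEnd_stop_char cs cs.length e hlt ?_]
      · omega
      · rcases qok_quote_cases cs e hlt (hb hlt) with hq | hq <;> rw [hq] <;> decide
    · rw [qokKeyEnd_stop cs cs.length e hlt]; omega
  | succ m ih =>
    intro jt hm hle
    have hlen : ((cs.drop s).take (e - s)).length = e - s := by simp; omega
    by_cases hlt : s + jt < e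
    · have hjl : jt < ((cs.drop s).take (e - s)).length := by omega
      have hcl : s + jt < cs.length := by omega
      by_cases hc : (PySem.Chars.isalnum (cs[s + jt]'hcl) || cs[s + jt]'hcl == '_' ||
          cs[s + jt]'hcl == '$') = true
      · have hct : (PySem.Chars.isalnum (((cs.drop s).take (e - s))[jt]'hjl) ||
            ((cs.drop s).take (e - s))[jt]'hjl == '_' ||
            ((cs.drop s).take (e - s))[jt]'hjl == '$') = true := by
          rw [List.getElem_take, List.getElem_drop]
          exact hc
        rw [qokKeyEnd_step cs cs.length (s + jt) (by omega) hcl hc]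
        rw [qokKeyEnd_step ((cs.drop s).take (e - s)) (e - s) jt (by omega) hjl hct]
        rw [qokKeyEnd_inv cs (cs.length - (s + jt + 1)) (s + jt + 1) (cs.length - 1) cs.length
            (by omega) (by omega) (by omega)]
        rw [qokKeyEnd_inv ((cs.drop s).take (e - s)) (e - s - (jt + 1)) (jt + 1) (e - s - 1)
            (e - s) (by omega) (by omega) (by omega)]
        exact ih (jt + 1) (by omega) (by omega)
      · rw [Bool.not_eq_true] at hc
        have hct : (PySem.Chars.isalnum (((cs.drop s).take (e - s))[jt]'hjl) ||
            ((cs.drop s).take (e - s))[jt]'hjl == '_' ||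
            ((cs.drop s).take (e - s))[jt]'hjl == '$') = false := by
          rw [List.getElem_take, List.getElem_drop]
          exact hc
        rw [qokKeyEnd_stop_char cs cs.length (s + jt) hcl hc]
        rw [qokKeyEnd_stop_char ((cs.drop s).take (e - s)) (e - s) jt hjl hct]
    · have hjt : jt = e - s := by omega
      have hej : s + jt = e := by omega
      rw [hej, hjt]
      rw [qokKeyEnd_stop ((cs.drop s).take (e - s)) (e - s) (e - s) (by omega)]
      by_cases hlt2 : e < cs.length
      · rw [qokKeyEnd_stop_char cs cs.length e hlt2 ?_]
        · omega
        · rcases qok_quote_cases cs e hlt2 (hb hlt2) with hq | hq <;> rw [hq] <;> decide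
      · rw [qokKeyEnd_stop cs cs.length e hlt2]; omega

theorem qokWsEnd_shift (cs : List Char) (s e : Nat) (he : e ≤ cs.length)
    (hb : e < cs.length → (cs.getD e ' ' == '"' || cs.getD e ' ' == '\'') = true) :
    ∀ m jt, (e - s) - jt ≤ m → s + jt ≤ e →
      qokWsEnd cs cs.length (s + jt)
        = s + qokWsEnd ((cs.drop s).take (e - s)) (e - s) jt := by
  intro m
  induction m with
  | zero =>
    intro jt hm hle
    have hjt : jt = e - s := by omega
    have hej : s + jt = e := by omega
    have hlen : ((cs.drop s).take (e - s)).length = e - s := by simp; omega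
    rw [hej, hjt]
    rw [qokWsEnd_stop ((cs.drop s).take (e - s)) (e - s) (e - s) (by omega)]
    by_cases hlt : e < cs.length
    · rw [qokWsEnd_stop_char cs cs.length e hlt ?_]
      · omega
      · rcases qok_quote_cases cs e hlt (hb hlt) with hq | hq <;> rw [hq] <;> decide
    · rw [qokWsEnd_stop cs cs.length e hlt]; omega
  | succ m ih =>
    intro jt hm hle
    have hlen : ((cs.drop s).take (e - s)).length = e - s := by simp; omega
    by_cases hlt : s + jt < e
    · have hjl : jt < ((cs.drop s).take (e - s)).length := by omega
      have hcl : s + jt < cs.length := by omega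
      by_cases hc : PySem.Chars.isspace (cs[s + jt]'hcl) = true
      · have hct : PySem.Chars.isspace (((cs.drop s).take (e - s))[jt]'hjl) = true := by
          rw [List.getElem_take, List.getElem_drop]
          exact hc
        rw [qokWsEnd_step cs cs.length (s + jt) (by omega) hcl hc]
        rw [qokWsEnd_step ((cs.drop s).take (e - s)) (e - s) jt (by omega) hjl hct]
        rw [qokWsEnd_inv cs (cs.length - (s + jt + 1)) (s + jt + 1) (cs.length - 1) cs.length
            (by omega) (by omega) (by omega)]
        rw [qokWsEnd_inv ((cs.drop s).take (e - s)) (e - s - (jt + 1)) (jt + 1) (e - s - 1)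
            (e - s) (by omega) (by omega) (by omega)]
        exact ih (jt + 1) (by omega) (by omega)
      · rw [Bool.not_eq_true] at hc
        have hct : PySem.Chars.isspace (((cs.drop s).take (e - s))[jt]'hjl) = false := by
          rw [List.getElem_take, List.getElem_drop]
          exact hc
        rw [qokWsEnd_stop_char cs cs.length (s + jt) hcl hc]
        rw [qokWsEnd_stop_char ((cs.drop s).take (e - s)) (e - s) jt hjl hct]
    · have hjt : jt = e - s := by omega
      have hej : s + jt = e := by omega
      rw [hej, hjt]
      rw [qokWsEnd_stop ((cs.drop s).take (e - s)) (e - s) (e - s) (by omega)]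
      by_cases hlt2 : e < cs.length
      · rw [qokWsEnd_stop_char cs cs.length e hlt2 ?_]
        · omega
        · rcases qok_quote_cases cs e hlt2 (hb hlt2) with hq | hq <;> rw [hq] <;> decide
      · rw [qokWsEnd_stop cs cs.length e hlt2]; omega

-- code-run end: characterization
theorem qokCodeEnd_ge (cs : List Char) : ∀ fuel j, j ≤ qokCodeEnd cs fuel j := by
  intro fuel
  induction fuel with
  | zero => intro j; simp [qokCodeEnd]
  | succ f ih =>
    intro j
    simp only [qokCodeEnd]
    split_ifs
    · omega
    · have := ih (j+1); omega
    · omega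

theorem qokCodeEnd_le (cs : List Char) :
    ∀ fuel j, j ≤ cs.length → qokCodeEnd cs fuel j ≤ cs.length := by
  intro fuel
  induction fuel with
  | zero => intro j hj; simpa [qokCodeEnd] using hj
  | succ f ih =>
    intro j hj
    simp only [qokCodeEnd]
    split_ifs with h hc
    · omega
    · exact ih (j+1) (by omega)
    · omega

theorem qokCodeEnd_not_quote (cs : List Char) :
    ∀ fuel j p, cs.length - j ≤ fuel → j ≤ p → p < qokCodeEnd cs fuel j →
      (cs.getD p ' ' == '"' || cs.getD p ' ' == '\'') = false := by
  intro fuel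
  induction fuel with
  | zero => intro j p hm hjp hp; have := qokCodeEnd_ge cs 0 j; simp [qokCodeEnd] at hp; omega
  | succ f ih =>
    intro j p hm hjp hp
    by_cases h : j < cs.length
    · rw [qokCodeEnd, dif_pos h] at hp
      by_cases hq : (cs[j] == '"' || cs[j] == '\'') = true
      · rw [if_pos hq] at hp; omega
      · rw [Bool.not_eq_true] at hq
        rw [if_neg (by simp [hq])] at hp
        by_cases hpj : p = j
        · subst hpj
          rw [List.getD_eq_getElem cs ' ' h]
          exact hq
        · exact ih (j+1) p (by omega) (by omega) hp
    · rw [qokCodeEnd, dif_neg h] at hp; omega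

theorem qokCodeEnd_quote_end (cs : List Char) :
    ∀ fuel j, cs.length - j ≤ fuel → qokCodeEnd cs fuel j < cs.length →
      (cs.getD (qokCodeEnd cs fuel j) ' ' == '"' ||
       cs.getD (qokCodeEnd cs fuel j) ' ' == '\'') = true := by
  intro fuel
  induction fuel with
  | zero => intro j hm hlt; simp only [qokCodeEnd] at hlt ⊢; omega
  | succ f ih =>
    intro j hm hlt
    by_cases h : j < cs.length
    · rw [qokCodeEnd, dif_pos h] at hlt ⊢
      by_cases hq : (cs[j] == '"' || cs[j] == '\'') = true
      · rw [if_pos hq] at hlt ⊢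
        rw [List.getD_eq_getElem cs ' ' h]
        exact hq
      · rw [if_neg hq] at hlt ⊢
        exact ih (j+1) (by omega) hlt
    · rw [qokCodeEnd, dif_neg h] at hlt; omega

-- the QK loop only appends to its accumulator
theorem qokQKLoop_append (t : List Char) (p : Option Char) :
    ∀ f out i, qokQKLoop t p f out i = out ++ qokQKLoop t p f [] i := by
  intro f
  induction f with
  | zero => intro out i; simp [qokQKLoop]
  | succ f ih =>
    intro out i
    by_cases h : i < t.length
    · rw [qokQKLoop, qokQKLoop, dif_pos h, dif_pos h]
      simp only
      split_ifs <;> (simp only [List.nil_append]; conv_lhs => rw [ih]) <;> (conv_rhs => rw [ih]) <;> simp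
    · rw [qokQKLoop, qokQKLoop, dif_neg h, dif_neg h]; simp

-- slicing inside a segment is slicing the source
theorem slice_shift (cs : List Char) (s e it jt : Nat) (hj : jt ≤ e - s) (hij : it ≤ jt) :
    (((cs.drop s).take (e - s)).drop it).take (jt - it) = (cs.drop (s + it)).take (jt - it) := by
  rw [List.drop_take, List.drop_drop, List.take_take]
  have h1 : min (jt - it) (e - s - it) = jt - it := by omega
  have h2 : s + it = it + s := by omega
  rw [h1, h2]

-- step lemmas for A's loop in the non-string state
theorem qokLoopA_step_openq (cs : List Char) (q : Char) (j f : Nat) (r : List Char)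
    (h : j < cs.length) (hq : (cs[j] == '"' || cs[j] == '\'') = true) :
    qokLoopA cs (f+1) r false false q j
      = qokLoopA cs f (r ++ [cs[j]]) true false (cs[j]) (j+1) := by
  rw [qokLoopA, dif_pos h]
  simp [hq]

theorem qokLoopA_step_noalpha (cs : List Char) (q : Char) (j f : Nat) (r : List Char)
    (h : j < cs.length) (hq : (cs[j] == '"' || cs[j] == '\'') = false)
    (ha : (PySem.Chars.isalpha cs[j] || cs[j] == '_' || cs[j] == '$') = false) :
    qokLoopA cs (f+1) r false false q j
      = qokLoopA cs f (r ++ [cs[j]]) false false q (j+1) := by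
  rw [qokLoopA, dif_pos h]
  simp [hq, ha]

theorem qokLoopA_step_noprev (cs : List Char) (q : Char) (j f : Nat) (r : List Char)
    (h : j < cs.length) (hq : (cs[j] == '"' || cs[j] == '\'') = false)
    (ha : (PySem.Chars.isalpha cs[j] || cs[j] == '_' || cs[j] == '$') = true)
    (hp : (if j = 0 then true
           else (cs.getD (j-1) ' ' == '{' || cs.getD (j-1) ' ' == ',' ||
                 cs.getD (j-1) ' ' == '\n' || cs.getD (j-1) ' ' == ' ')) = false) :
    qokLoopA cs (f+1) r false false q j
      = qokLoopA cs f (r ++ [cs[j]]) false false q (j+1) := by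
  rw [qokLoopA, dif_pos h]
  simp at hp
  simp [hq, ha, hp]

theorem qokLoopA_step_key_colon (cs : List Char) (q : Char) (j f : Nat) (r : List Char)
    (h : j < cs.length) (hq : (cs[j] == '"' || cs[j] == '\'') = false)
    (ha : (PySem.Chars.isalpha cs[j] || cs[j] == '_' || cs[j] == '$') = true)
    (hp : (if j = 0 then true
           else (cs.getD (j-1) ' ' == '{' || cs.getD (j-1) ' ' == ',' ||
                 cs.getD (j-1) ' ' == '\n' || cs.getD (j-1) ' ' == ' ')) = true)
    (hla : qokWsEnd cs cs.length (qokKeyEnd cs cs.length j) < cs.length)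
    (hc : (cs[qokWsEnd cs cs.length (qokKeyEnd cs cs.length j)]'hla == ':') = true) :
    qokLoopA cs (f+1) r false false q j
      = qokLoopA cs f
          (r ++ ('"' :: PySem.List.slice cs (some (j : Int))
                   (some ((qokKeyEnd cs cs.length j : Nat) : Int)) ++ ['"']))
          false false q (qokKeyEnd cs cs.length j) := by
  rw [qokLoopA, dif_pos h]
  simp at hp
  simp [hq, ha, hp, hla, hc]

theorem qokLoopA_step_key_plain (cs : List Char) (q : Char) (j f : Nat) (r : List Char)
    (h : j < cs.length) (hq : (cs[j] == '"' || cs[j] == '\'') = false)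
    (ha : (PySem.Chars.isalpha cs[j] || cs[j] == '_' || cs[j] == '$') = true)
    (hp : (if j = 0 then true
           else (cs.getD (j-1) ' ' == '{' || cs.getD (j-1) ' ' == ',' ||
                 cs.getD (j-1) ' ' == '\n' || cs.getD (j-1) ' ' == ' ')) = true)
    (hno : ∀ (hla : qokWsEnd cs cs.length (qokKeyEnd cs cs.length j) < cs.length),
       (cs[qokWsEnd cs cs.length (qokKeyEnd cs cs.length j)]'hla == ':') = false) :
    qokLoopA cs (f+1) r false false q j
      = qokLoopA cs f
          (r ++ PySem.List.slice cs (some (j : Int))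
                  (some ((qokKeyEnd cs cs.length j : Nat) : Int)))
          false false q (qokKeyEnd cs cs.length j) := by
  rw [qokLoopA, dif_pos h]
  simp at hp
  by_cases hla : qokWsEnd cs cs.length (qokKeyEnd cs cs.length j) < cs.length
  · simp [hq, ha, hp, hla, hno hla]
  · simp [hq, ha, hp, hla]

-- step lemmas for B's `_quote_keys` loop
theorem qokQK_step_plain (t : List Char) (p : Option Char) (f i : Nat)
    (out : List (List Char)) (h : i < t.length)
    (hg : ((PySem.Chars.isalpha t[i] || t[i] == '_' || t[i] == '$') &&
      (match (if i = 0 then p else some (t.getD (i-1) ' ')) with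
       | none => true
       | some b => b == '{' || b == ',' || b == '\n' || b == ' ')) = false) :
    qokQKLoop t p (f+1) out i = qokQKLoop t p f (out ++ [[t[i]]]) (i+1) := by
  rw [qokQKLoop, dif_pos h]
  simp only [hg, Bool.false_eq_true, if_false]

theorem qokQK_step_key_colon (t : List Char) (p : Option Char) (f i : Nat)
    (out : List (List Char)) (h : i < t.length)
    (hg : ((PySem.Chars.isalpha t[i] || t[i] == '_' || t[i] == '$') &&
      (match (if i = 0 then p else some (t.getD (i-1) ' ')) with
       | none => true
       | some b => b == '{' || b == ',' || b == '\n' || b == ' ')) = true)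
    (hk : qokWsEndT t t.length (qokKeyEndT t t.length (i+1)) < t.length)
    (hc : (t[qokWsEndT t t.length (qokKeyEndT t t.length (i+1))]'hk == ':') = true) :
    qokQKLoop t p (f+1) out i
      = qokQKLoop t p f
          (out ++ ['"' :: PySem.List.slice t (some (i : Int))
                    (some ((qokKeyEndT t t.length (i+1) : Nat) : Int)) ++ ['"']])
          (qokKeyEndT t t.length (i+1)) := by
  rw [qokQKLoop, dif_pos h]
  simp only [hg, if_true]
  rw [dif_pos hk, if_pos hc]

theorem qokQK_step_key_plain (t : List Char) (p : Option Char) (f i : Nat)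
    (out : List (List Char)) (h : i < t.length)
    (hg : ((PySem.Chars.isalpha t[i] || t[i] == '_' || t[i] == '$') &&
      (match (if i = 0 then p else some (t.getD (i-1) ' ')) with
       | none => true
       | some b => b == '{' || b == ',' || b == '\n' || b == ' ')) = true)
    (hno : ∀ (hk : qokWsEndT t t.length (qokKeyEndT t t.length (i+1)) < t.length),
       (t[qokWsEndT t t.length (qokKeyEndT t t.length (i+1))]'hk == ':') = false) :
    qokQKLoop t p (f+1) out i
      = qokQKLoop t p f
          (out ++ [PySem.List.slice t (some (i : Int))
                     (some ((qokKeyEndT t t.length (i+1) : Nat) : Int))])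
          (qokKeyEndT t t.length (i+1)) := by
  rw [qokQKLoop, dif_pos h]
  simp only [hg, if_true]
  by_cases hk : qokWsEndT t t.length (qokKeyEndT t t.length (i+1)) < t.length
  · rw [dif_pos hk, if_neg (by simp [hno hk])]
  · rw [dif_neg hk]

-- A's loop across a quote-free code segment [s, e) appends exactly what B's
-- `_quote_keys` produces on that segment, and resumes at e
theorem qokCode (cs : List Char) (q : Char) (s e : Nat) (he : e ≤ cs.length)
    (hnq : ∀ p, s ≤ p → p < e → (cs.getD p ' ' == '"' || cs.getD p ' ' == '\'') = false)
    (hb : e < cs.length → (cs.getD e ' ' == '"' || cs.getD e ' ' == '\'') = true) :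
    ∀ m it fb R, (e - s) - it ≤ m → m < fb → s + it ≤ e →
      qokLoopA cs (cs.length + 1) R false false q (s + it)
        = qokLoopA cs (cs.length + 1)
            (R ++ (qokQKLoop ((cs.drop s).take (e - s))
                     (if s = 0 then none else some (cs.getD (s-1) ' ')) fb [] it).flatten)
            false false q e := by
  intro m
  induction m with
  | zero =>
    intro it fb R hm hfb hle
    have hlen : ((cs.drop s).take (e - s)).length = e - s := by simp; omega
    obtain ⟨g, rfl⟩ : ∃ g, fb = g + 1 := ⟨fb - 1, by omega⟩
    have hej : s + it = e := by omega
    rw [qokQKLoop, dif_neg (by omega)]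
    simp [hej]
  | succ m ih =>
    intro it fb R hm hfb hle
    have hlen : ((cs.drop s).take (e - s)).length = e - s := by simp; omega
    obtain ⟨g, rfl⟩ : ∃ g, fb = g + 1 := ⟨fb - 1, by omega⟩
    by_cases hlt : s + it < e
    · have hjl : it < ((cs.drop s).take (e - s)).length := by omega
      have hcl : s + it < cs.length := by omega
      have hchar : ((cs.drop s).take (e - s))[it]'hjl = cs[s + it]'hcl := by
        rw [List.getElem_take, List.getElem_drop]
      have hq : (cs[s + it]'hcl == '"' || cs[s + it]'hcl == '\'') = false := by
        have := hnq (s + it) (by omega) hlt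
        rw [List.getD_eq_getElem cs ' ' hcl] at this
        exact this
      -- B's `before` test agrees with A's `previous` test
      have hbok : (match (if it = 0 then (if s = 0 then none else some (cs.getD (s-1) ' '))
                         else some (((cs.drop s).take (e - s)).getD (it-1) ' ')) with
                   | none => true
                   | some b => b == '{' || b == ',' || b == '\n' || b == ' ')
          = (if s + it = 0 then true
             else (cs.getD (s + it - 1) ' ' == '{' || cs.getD (s + it - 1) ' ' == ',' ||
                   cs.getD (s + it - 1) ' ' == '\n' || cs.getD (s + it - 1) ' ' == ' ')) := by
        by_cases hit : it = 0
        · subst hit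
          by_cases hs : s = 0
          · subst hs; simp
          · rw [if_pos rfl, if_neg hs, if_neg (show ¬ s + 0 = 0 by omega)]
            simp
        · rw [if_neg hit, if_neg (by omega)]
          have h1 : it - 1 < ((cs.drop s).take (e - s)).length := by omega
          have h2 : s + it - 1 < cs.length := by omega
          have hgd : ((cs.drop s).take (e - s)).getD (it-1) ' ' = cs.getD (s + it - 1) ' ' := by
            rw [List.getD_eq_getElem _ ' ' h1, List.getD_eq_getElem cs ' ' h2]
            rw [List.getElem_take, List.getElem_drop]
            congr 1
            omega
          rw [hgd]
      by_cases ha : (PySem.Chars.isalpha (cs[s + it]'hcl) || cs[s + it]'hcl == '_' ||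
          cs[s + it]'hcl == '$') = true
      · by_cases hp : (if s + it = 0 then true
            else (cs.getD (s + it - 1) ' ' == '{' || cs.getD (s + it - 1) ' ' == ',' ||
                  cs.getD (s + it - 1) ' ' == '\n' || cs.getD (s + it - 1) ' ' == ' ')) = true
        · -- key branch on both sides
          have hgB : ((PySem.Chars.isalpha (((cs.drop s).take (e - s))[it]'hjl) ||
              ((cs.drop s).take (e - s))[it]'hjl == '_' ||
              ((cs.drop s).take (e - s))[it]'hjl == '$') &&
              (match (if it = 0 then (if s = 0 then none else some (cs.getD (s-1) ' '))
                     else some (((cs.drop s).take (e - s)).getD (it-1) ' ')) with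
               | none => true
               | some b => b == '{' || b == ',' || b == '\n' || b == ' ')) = true := by
            rw [hchar, hbok, ha, hp]
            rfl
          have halnum : (PySem.Chars.isalnum (cs[s + it]'hcl) || cs[s + it]'hcl == '_' ||
              cs[s + it]'hcl == '$') = true := by
            simp only [PySem.Chars.isalnum]
            revert ha
            simp
            tauto
          have hkey1 : qokKeyEnd cs cs.length (s + it) = qokKeyEnd cs cs.length (s + it + 1) := by
            rw [qokKeyEnd_step cs cs.length (s + it) (by omega) hcl halnum]
            exact qokKeyEnd_inv cs (cs.length - (s + it + 1)) (s + it + 1) (cs.length - 1)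
              cs.length (by omega) (by omega) (by omega)
          have hkey2 : qokKeyEnd cs cs.length (s + it + 1)
              = s + qokKeyEnd ((cs.drop s).take (e - s)) (e - s) (it + 1) := by
            rw [show s + it + 1 = s + (it + 1) by omega]
            exact qokKeyEnd_shift cs s e he hb ((e - s) - (it + 1)) (it + 1) (by omega) (by omega)
          have hAkey : qokKeyEnd cs cs.length (s + it)
              = s + qokKeyEnd ((cs.drop s).take (e - s)) (e - s) (it + 1) := hkey1.trans hkey2
          have hkeyB : qokKeyEndT ((cs.drop s).take (e - s))
                ((cs.drop s).take (e - s)).length (it + 1)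
              = qokKeyEnd ((cs.drop s).take (e - s)) (e - s) (it + 1) := by
            rw [qokKeyEndT_eq]
            exact qokKeyEnd_inv ((cs.drop s).take (e - s))
              (((cs.drop s).take (e - s)).length - (it + 1)) (it + 1)
              ((cs.drop s).take (e - s)).length (e - s) (by omega) (by omega) (by omega)
          have hJlb : it + 1 ≤ qokKeyEnd ((cs.drop s).take (e - s)) (e - s) (it + 1) :=
            qokKeyEnd_le _ (e - s) (it + 1)
          have hJub : qokKeyEnd ((cs.drop s).take (e - s)) (e - s) (it + 1) ≤ e - s := by
            have := qokKeyEnd_le_length ((cs.drop s).take (e - s)) (e - s) (it + 1) (by omega)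
            omega
          have hws : qokWsEnd cs cs.length
                (s + qokKeyEnd ((cs.drop s).take (e - s)) (e - s) (it + 1))
              = s + qokWsEnd ((cs.drop s).take (e - s)) (e - s)
                  (qokKeyEnd ((cs.drop s).take (e - s)) (e - s) (it + 1)) :=
            qokWsEnd_shift cs s e he hb
              ((e - s) - qokKeyEnd ((cs.drop s).take (e - s)) (e - s) (it + 1))
              (qokKeyEnd ((cs.drop s).take (e - s)) (e - s) (it + 1)) (by omega) (by omega)
          have hwsB : qokWsEndT ((cs.drop s).take (e - s)) ((cs.drop s).take (e - s)).length
                (qokKeyEndT ((cs.drop s).take (e - s)) ((cs.drop s).take (e - s)).length (it + 1))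
              = qokWsEnd ((cs.drop s).take (e - s)) (e - s)
                  (qokKeyEnd ((cs.drop s).take (e - s)) (e - s) (it + 1)) := by
            rw [qokWsEndT_eq, hkeyB]
            exact qokWsEnd_inv ((cs.drop s).take (e - s))
              (((cs.drop s).take (e - s)).length
                - qokKeyEnd ((cs.drop s).take (e - s)) (e - s) (it + 1))
              (qokKeyEnd ((cs.drop s).take (e - s)) (e - s) (it + 1))
              ((cs.drop s).take (e - s)).length (e - s) (by omega) (by omega) (by omega)
          have hKlb : qokKeyEnd ((cs.drop s).take (e - s)) (e - s) (it + 1)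
              ≤ qokWsEnd ((cs.drop s).take (e - s)) (e - s)
                  (qokKeyEnd ((cs.drop s).take (e - s)) (e - s) (it + 1)) :=
            qokWsEnd_le _ (e - s) _
          have hKub : qokWsEnd ((cs.drop s).take (e - s)) (e - s)
                (qokKeyEnd ((cs.drop s).take (e - s)) (e - s) (it + 1)) ≤ e - s := by
            have := qokWsEnd_le_length ((cs.drop s).take (e - s)) (e - s)
              (qokKeyEnd ((cs.drop s).take (e - s)) (e - s) (it + 1)) (by omega)
            omega
          have hAws : qokWsEnd cs cs.length (qokKeyEnd cs cs.length (s + it))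
              = s + qokWsEnd ((cs.drop s).take (e - s)) (e - s)
                  (qokKeyEnd ((cs.drop s).take (e - s)) (e - s) (it + 1)) := by
            rw [hAkey, hws]
          have hgdK : qokWsEnd ((cs.drop s).take (e - s)) (e - s)
                (qokKeyEnd ((cs.drop s).take (e - s)) (e - s) (it + 1)) < e - s →
              ((cs.drop s).take (e - s)).getD (qokWsEnd ((cs.drop s).take (e - s))
                (e - s) (qokKeyEnd ((cs.drop s).take (e - s)) (e - s) (it + 1))) ' '
              = cs.getD (s + qokWsEnd ((cs.drop s).take (e - s)) (e - s)
                  (qokKeyEnd ((cs.drop s).take (e - s)) (e - s) (it + 1))) ' ' := by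
            intro hKlt
            rw [List.getD_eq_getElem _ ' ' (by omega), List.getD_eq_getElem cs ' ' (by omega)]
            rw [List.getElem_take, List.getElem_drop]
          have hslice : PySem.List.slice cs (some ((s + it : Nat) : Int))
                (some ((qokKeyEnd cs cs.length (s + it) : Nat) : Int))
              = PySem.List.slice ((cs.drop s).take (e - s)) (some ((it : Nat) : Int))
                  (some ((qokKeyEndT ((cs.drop s).take (e - s))
                    ((cs.drop s).take (e - s)).length (it + 1) : Nat) : Int)) := by
            rw [hAkey, hkeyB, PySem.List.slice_natCast, PySem.List.slice_natCast]
            rw [slice_shift cs s e it (qokKeyEnd ((cs.drop s).take (e - s)) (e - s) (it + 1))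
              hJub (by omega)]
            congr 1
            omega
          by_cases hcolon : (cs.getD (s + qokWsEnd ((cs.drop s).take (e - s)) (e - s)
              (qokKeyEnd ((cs.drop s).take (e - s)) (e - s) (it + 1))) ' ' == ':') = true
          · -- a colon follows: A raises hla; the lookahead must be inside the segment
            have hKlt : qokWsEnd ((cs.drop s).take (e - s)) (e - s)
                (qokKeyEnd ((cs.drop s).take (e - s)) (e - s) (it + 1)) < e - s := by
              by_contra hKge
              have h1 : qokWsEnd ((cs.drop s).take (e - s)) (e - s)
                  (qokKeyEnd ((cs.drop s).take (e - s)) (e - s) (it + 1)) = e - s := by omega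
              rw [h1, show s + (e - s) = e by omega] at hcolon
              by_cases h2 : e < cs.length
              · rcases qok_quote_cases cs e h2 (hb h2) with h' | h' <;>
                  rw [List.getD_eq_getElem cs ' ' h2, h'] at hcolon <;> simp at hcolon
              · rw [List.getD_eq_default cs ' ' (by omega)] at hcolon
                simp at hcolon
            have hla : qokWsEnd cs cs.length (qokKeyEnd cs cs.length (s + it)) < cs.length := by
              rw [hAws]; omega
            have hcA : (cs[qokWsEnd cs cs.length (qokKeyEnd cs cs.length (s + it))]'hla
                == ':') = true := by
              rw [← List.getD_eq_getElem cs ' ' hla, hAws]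
              exact hcolon
            rw [qokLoopA_step_key_colon cs q (s + it) cs.length R hcl hq ha hp hla hcA]
            have hkB : qokWsEndT ((cs.drop s).take (e - s)) ((cs.drop s).take (e - s)).length
                (qokKeyEndT ((cs.drop s).take (e - s)) ((cs.drop s).take (e - s)).length
                  (it + 1)) < ((cs.drop s).take (e - s)).length := by
              rw [hwsB]; omega
            have hcB : (((cs.drop s).take (e - s))[qokWsEndT ((cs.drop s).take (e - s))
                ((cs.drop s).take (e - s)).length (qokKeyEndT ((cs.drop s).take (e - s))
                  ((cs.drop s).take (e - s)).length (it + 1))]'hkB == ':') = true := by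
              rw [← List.getD_eq_getElem _ ' ' hkB, hwsB,
                hgdK (by rw [hwsB] at hkB; omega)]
              exact hcolon
            rw [qokQK_step_key_colon ((cs.drop s).take (e - s))
              (if s = 0 then none else some (cs.getD (s-1) ' ')) g it [] hjl hgB hkB hcB]
            rw [qokQKLoop_append _ _ g, List.nil_append]
            rw [qokLoopA_inv cs (cs.length - qokKeyEnd cs cs.length (s + it)) cs.length
              (cs.length + 1)
              (R ++ ('"' :: PySem.List.slice cs (some ((s + it : Nat) : Int))
                (some ((qokKeyEnd cs cs.length (s + it) : Nat) : Int)) ++ ['"']))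
              false false q (qokKeyEnd cs cs.length (s + it))
              (by omega) (by rw [hAkey]; omega) (by rw [hAkey]; omega)]
            rw [hslice, hAkey, hkeyB]
            rw [ih (qokKeyEnd ((cs.drop s).take (e - s)) (e - s) (it + 1)) g _
              (by omega) (by omega) (by omega)]
            simp
          · -- no colon after the key: unquoted on both sides
            rw [Bool.not_eq_true] at hcolon
            have hno : ∀ (hla : qokWsEnd cs cs.length (qokKeyEnd cs cs.length (s + it))
                < cs.length), (cs[qokWsEnd cs cs.length
                  (qokKeyEnd cs cs.length (s + it))]'hla == ':') = false := by
              intro hla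
              rw [← List.getD_eq_getElem cs ' ' hla, hAws]
              exact hcolon
            rw [qokLoopA_step_key_plain cs q (s + it) cs.length R hcl hq ha hp hno]
            have hnoB : ∀ (hk : qokWsEndT ((cs.drop s).take (e - s))
                ((cs.drop s).take (e - s)).length (qokKeyEndT ((cs.drop s).take (e - s))
                  ((cs.drop s).take (e - s)).length (it + 1))
                < ((cs.drop s).take (e - s)).length),
                (((cs.drop s).take (e - s))[qokWsEndT ((cs.drop s).take (e - s))
                  ((cs.drop s).take (e - s)).length (qokKeyEndT ((cs.drop s).take (e - s))
                    ((cs.drop s).take (e - s)).length (it + 1))]'hk == ':') = false := by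
              intro hk
              rw [← List.getD_eq_getElem _ ' ' hk, hwsB,
                hgdK (by rw [hwsB] at hk; omega)]
              exact hcolon
            rw [qokQK_step_key_plain ((cs.drop s).take (e - s))
              (if s = 0 then none else some (cs.getD (s-1) ' ')) g it [] hjl hgB hnoB]
            rw [qokQKLoop_append _ _ g, List.nil_append]
            rw [qokLoopA_inv cs (cs.length - qokKeyEnd cs cs.length (s + it)) cs.length
              (cs.length + 1)
              (R ++ PySem.List.slice cs (some ((s + it : Nat) : Int))
                (some ((qokKeyEnd cs cs.length (s + it) : Nat) : Int)))
              false false q (qokKeyEnd cs cs.length (s + it))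
              (by omega) (by rw [hAkey]; omega) (by rw [hAkey]; omega)]
            rw [hslice, hAkey, hkeyB]
            rw [ih (qokKeyEnd ((cs.drop s).take (e - s)) (e - s) (it + 1)) g _
              (by omega) (by omega) (by omega)]
            simp
        · -- alpha start but the previous character is not a separator: copy the character
          rw [Bool.not_eq_true] at hp
          have hgB : ((PySem.Chars.isalpha (((cs.drop s).take (e - s))[it]'hjl) ||
              ((cs.drop s).take (e - s))[it]'hjl == '_' ||
              ((cs.drop s).take (e - s))[it]'hjl == '$') &&
              (match (if it = 0 then (if s = 0 then none else some (cs.getD (s-1) ' '))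
                     else some (((cs.drop s).take (e - s)).getD (it-1) ' ')) with
               | none => true
               | some b => b == '{' || b == ',' || b == '\n' || b == ' ')) = false := by
            rw [hchar, hbok, hp]
            simp
          rw [qokQK_step_plain ((cs.drop s).take (e - s))
            (if s = 0 then none else some (cs.getD (s-1) ' ')) g it [] hjl hgB]
          rw [qokLoopA_step_noprev cs q (s + it) cs.length R hcl hq ha hp]
          rw [qokQKLoop_append _ _ g, List.nil_append]
          rw [qokLoopA_inv cs (cs.length - (s + it + 1)) cs.length (cs.length + 1)
            (R ++ [cs[s + it]'hcl]) false false q (s + it + 1)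
            (by omega) (by omega) (by omega)]
          rw [show s + it + 1 = s + (it + 1) by omega]
          rw [ih (it + 1) g (R ++ [cs[s + it]'hcl]) (by omega) (by omega) (by omega)]
          simp [hchar]
      · -- not an identifier start: copy the character
        rw [Bool.not_eq_true] at ha
        have hgB : ((PySem.Chars.isalpha (((cs.drop s).take (e - s))[it]'hjl) ||
            ((cs.drop s).take (e - s))[it]'hjl == '_' ||
            ((cs.drop s).take (e - s))[it]'hjl == '$') &&
            (match (if it = 0 then (if s = 0 then none else some (cs.getD (s-1) ' '))
                   else some (((cs.drop s).take (e - s)).getD (it-1) ' ')) with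
             | none => true
             | some b => b == '{' || b == ',' || b == '\n' || b == ' ')) = false := by
          rw [hchar, ha]
          simp
        rw [qokQK_step_plain ((cs.drop s).take (e - s))
          (if s = 0 then none else some (cs.getD (s-1) ' ')) g it [] hjl hgB]
        rw [qokLoopA_step_noalpha cs q (s + it) cs.length R hcl hq ha]
        rw [qokQKLoop_append _ _ g, List.nil_append]
        rw [qokLoopA_inv cs (cs.length - (s + it + 1)) cs.length (cs.length + 1)
          (R ++ [cs[s + it]'hcl]) false false q (s + it + 1)
          (by omega) (by omega) (by omega)]
        rw [show s + it + 1 = s + (it + 1) by omega]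
        rw [ih (it + 1) g (R ++ [cs[s + it]'hcl]) (by omega) (by omega) (by omega)]
        simp [hchar]
    · have hej : s + it = e := by omega
      rw [qokQKLoop, dif_neg (by omega)]
      simp [hej]

-- fuel invariance for the segmenter
theorem qokSegs_inv (cs : List Char) :
    ∀ m i f1 f2, cs.length - i ≤ m → m < f1 → m < f2 → qokSegs cs f1 i = qokSegs cs f2 i := by
  intro m
  induction m with
  | zero =>
    intro i f1 f2 hm h1 h2
    obtain ⟨g1, rfl⟩ : ∃ g, f1 = g + 1 := ⟨f1 - 1, by omega⟩
    obtain ⟨g2, rfl⟩ : ∃ g, f2 = g + 1 := ⟨f2 - 1, by omega⟩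
    rw [qokSegs, qokSegs, dif_neg (by omega), dif_neg (by omega)]
  | succ m ih =>
    intro i f1 f2 hm h1 h2
    obtain ⟨g1, rfl⟩ : ∃ g, f1 = g + 1 := ⟨f1 - 1, by omega⟩
    obtain ⟨g2, rfl⟩ : ∃ g, f2 = g + 1 := ⟨f2 - 1, by omega⟩
    by_cases h : i < cs.length
    · rw [qokSegs, qokSegs, dif_pos h, dif_pos h]
      split_ifs with hq
      · have hsc : i + 1 ≤ qokScanStringB cs i := by
          have := qokScanGoB_min_le cs (cs.getD i ' ') cs.length (i+1)
          unfold qokScanStringB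
          omega
        exact congrArg _ (ih (qokScanStringB cs i) g1 g2 (by omega) (by omega) (by omega))
      · have hce : i + 1 ≤ qokCodeEnd cs cs.length i := by
          obtain ⟨G, hG⟩ : ∃ G, cs.length = G + 1 := ⟨cs.length - 1, by omega⟩
          rw [hG, qokCodeEnd, dif_pos (by omega)]
          rw [if_neg hq]
          have := qokCodeEnd_ge cs G (i+1)
          omega
        exact congrArg _ (ih (qokCodeEnd cs cs.length i) g1 g2 (by omega) (by omega) (by omega))
    · rw [qokSegs, qokSegs, dif_neg h, dif_neg h]

-- main simulation: A's loop from any non-string state produces B's joined segments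
theorem qokMain (cs : List Char) :
    ∀ m i R q, cs.length - i ≤ m →
      qokLoopA cs (cs.length + 1) R false false q i
        = R ++ ((qokSegs cs (cs.length + 1) i).map (fun seg =>
            let t := PySem.List.slice cs (some (seg.2.1 : Int)) (some (seg.2.2 : Int))
            if seg.1 then t
            else qokQuoteKeys t
              (if seg.2.1 = 0 then none
               else some (cs.getD (seg.2.1 - 1) ' ')))).flatten := by
  intro m
  induction m with
  | zero =>
    intro i R q hm
    rw [qokLoopA_done cs q i (by omega), qokSegs, dif_neg (by omega)]
    simp
  | succ m ih =>
    intro i R q hm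
    by_cases h : i < cs.length
    · rw [qokSegs, dif_pos h]
      by_cases hq : (cs[i]'h == '"' || cs[i]'h == '\'') = true
      · -- string-literal segment
        rw [if_pos hq]
        rw [qokLoopA_step_openq cs q i cs.length R h hq]
        have hgd : cs.getD i ' ' = cs[i]'h := List.getD_eq_getElem cs ' ' h
        have hscan : qokScanStringB cs i = qokScanGoB cs (cs[i]'h) cs.length (i+1) := by
          unfold qokScanStringB
          rw [hgd]
        have hs1 : i + 1 ≤ qokScanStringB cs i := by
          have := qokScanGoB_min_le cs (cs[i]'h) cs.length (i+1)
          rw [hscan]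
          omega
        have hs2 : qokScanStringB cs i ≤ cs.length := by
          rw [hscan]
          exact qokScanGoB_le cs (cs[i]'h) cs.length (i+1)
        rw [qokLoopA_string cs (cs[i]'h) cs.length (i+1) (R ++ [cs[i]'h]) cs.length cs.length
          (by omega) (by omega) (by omega)]
        rw [← hscan]
        rw [qokLoopA_inv cs (cs.length - qokScanStringB cs i)
          (cs.length - (qokScanStringB cs i - (i+1))) (cs.length + 1)
          (R ++ [cs[i]'h] ++ (cs.drop (i+1)).take (qokScanStringB cs i - (i+1)))
          false false (cs[i]'h) (qokScanStringB cs i) (by omega) (by omega) (by omega)]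
        rw [ih (qokScanStringB cs i) _ (cs[i]'h) (by omega)]
        rw [qokSegs_inv cs (cs.length - qokScanStringB cs i) (qokScanStringB cs i)
          cs.length (cs.length + 1) (by omega) (by omega) (by omega)]
        simp only [List.map_cons, List.flatten_cons]
        rw [PySem.List.slice_natCast, chunk_cons cs i (qokScanStringB cs i) h hs1]
        simp
      · -- code segment
        rw [Bool.not_eq_true] at hq
        rw [if_neg (by simp [hq])]
        have hge : i + 1 ≤ qokCodeEnd cs cs.length i := by
          obtain ⟨G, hG⟩ : ∃ G, cs.length = G + 1 := ⟨cs.length - 1, by omega⟩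
          rw [hG, qokCodeEnd, dif_pos (by omega), if_neg (by simp [hq])]
          have := qokCodeEnd_ge cs G (i+1)
          omega
        have hle2 : qokCodeEnd cs cs.length i ≤ cs.length :=
          qokCodeEnd_le cs cs.length i (by omega)
        have hcode := qokCode cs q i (qokCodeEnd cs cs.length i) hle2
          (fun p hp1 hp2 => qokCodeEnd_not_quote cs cs.length i p (by omega) hp1 hp2)
          (fun hlt => qokCodeEnd_quote_end cs cs.length i (by omega) hlt)
          (qokCodeEnd cs cs.length i - i) 0
          (((cs.drop i).take (qokCodeEnd cs cs.length i - i)).length + 1) R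
          (by omega) (by simp; omega) (by omega)
        simp only [Nat.add_zero] at hcode
        rw [hcode]
        rw [ih (qokCodeEnd cs cs.length i) _ q (by omega)]
        rw [qokSegs_inv cs (cs.length - qokCodeEnd cs cs.length i) (qokCodeEnd cs cs.length i)
          cs.length (cs.length + 1) (by omega) (by omega) (by omega)]
        simp [qokQuoteKeys, PySem.List.slice_natCast]
    · rw [qokLoopA_done cs q i h, qokSegs, dif_neg h]
      simp

-- ===== VERDICT (by name: the statement is the Claim_ definition above) =====
theorem quote_object_keys_spec : Claim_equal_quote_object_keys := by
  intro source _
  unfold Spec_quote_object_keys quote_object_keys quote_object_keys_alt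
  exact congrArg String.ofList
    (qokMain source.toList source.toList.length 0 [] ' ' (by omega))
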